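-- pv_equiv track=rewrite | github.com/brucelit/State_space_traversal | astar_cache_pp.py | get_solution_vec
-- ===== SOURCE A (Python) =====
-- from copy import deepcopy, copy
--
-- def get_solution_vec(ini_vec, pre_trans_lst):
--     # get the new solution vec from initial marking
--     trust = False
--     # check whether there are paths that have valid solution vec
--     valid_path = [1 for i in range(len(pre_trans_lst))]
--     count = 0
--     x = []
--     solution_to_add_lst = []
--     for trans_lst in pre_trans_lst:
--         solution_vec = deepcopy(ini_vec)
--         for trans in range(len(trans_lst)):
--             solution_vec[trans_lst[trans]] -= 1
--             # when the solution vector encounters <0, means no longer trustable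
--             if solution_vec[trans_lst[trans]] < 0:
--                 valid_path[count] = 0
--                 break
--         solution_to_add_lst.append(solution_vec)
--         count += 1
--     if 1 in valid_path:
--         trust = True
--         for i in range(len(valid_path)):
--             if valid_path[i] == 1:
--                 x.append(solution_to_add_lst[i])
--     return x, trust
-- ===== SOURCE B (Python) =====
-- def get_solution_vec(ini_vec, pre_trans_lst):
--     # Tally each path's target cells once, test the tallies against the
--     # initial vector, and emit the decremented vector for every valid path.
--     n = len(ini_vec)
--     x = []
--     for trans_lst in pre_trans_lst:
--         counts = {}
--         for t in trans_lst:
--             i = t + n if t < 0 else t  # negative positions address from the end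
--             counts[i] = counts.get(i, 0) + 1
--         if all(ini_vec[i] >= c for i, c in counts.items()):
--             x.append([ini_vec[i] - counts.get(i, 0) for i in range(n)])
--     return x, bool(x)
-- ===== Notes on version B (the rewrite author's own statement) =====
-- stated objective: alternative
-- what changed: Replaces A's per-element decrement-with-early-break scan plus valid_path/solution_to_add_lst bookkeeping by a per-path tally dict checked against ini_vec once, emitting each valid decremented vector directly; Pre_ excludes inputs with an index outside [-len(ini_vec), len(ini_vec)), on which A raises IndexError unless an earlier exhausted cell breaks the scan first.
-- outside the precondition, e.g. on get_solution_vec([0], [[0, 5]]): A returns ([], False), B returns ([], False)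
import Mathlib
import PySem

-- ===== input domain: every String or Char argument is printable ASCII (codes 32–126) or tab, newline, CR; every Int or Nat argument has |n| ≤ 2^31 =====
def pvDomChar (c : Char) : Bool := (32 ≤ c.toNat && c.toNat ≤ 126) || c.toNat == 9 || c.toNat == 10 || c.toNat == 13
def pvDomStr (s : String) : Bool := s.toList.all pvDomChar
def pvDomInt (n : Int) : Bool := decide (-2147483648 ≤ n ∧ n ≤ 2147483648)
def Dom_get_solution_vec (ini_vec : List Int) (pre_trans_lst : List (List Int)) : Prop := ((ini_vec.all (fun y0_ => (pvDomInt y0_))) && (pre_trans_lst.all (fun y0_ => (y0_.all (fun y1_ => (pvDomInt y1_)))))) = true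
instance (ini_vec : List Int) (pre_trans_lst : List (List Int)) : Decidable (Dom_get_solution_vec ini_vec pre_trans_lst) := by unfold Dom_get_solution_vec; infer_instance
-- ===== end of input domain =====

-- B replaces A's per-element decrement-with-early-break scan by a per-path tally
-- dict checked against ini_vec once (alternative decomposition, same cost).

-- ===== PORT A =====
-- inner 'for trans in range(len(trans_lst))' loop of A: decrement, break when < 0
def pvInnerA : List Int → List Int → List Int × Bool
  | v, [] => (v, true)
  | v, t :: ts =>
    let v' := PySem.List.pySetD v t (PySem.List.pyGetD v t 0 - 1)
    if PySem.List.pyGetD v' t 0 < 0 then (v', false)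
    else pvInnerA v' ts

def get_solution_vec (ini_vec : List Int) (pre_trans_lst : List (List Int)) : List (List Int) × Bool :=
  let valid_path0 : List Int := (PySem.List.pyRange 0 pre_trans_lst.length 1).map (fun _ => 1)
  let st := pre_trans_lst.foldl
    (fun (st : List Int × Int × List (List Int)) trans_lst =>
      let r := pvInnerA ini_vec trans_lst
      let vp := if r.2 then st.1 else PySem.List.pySetD st.1 st.2.1 0
      (vp, st.2.1 + 1, st.2.2 ++ [r.1]))
    (valid_path0, (0 : Int), ([] : List (List Int)))
  if (1 : Int) ∈ st.1 then
    ((PySem.List.pyRange 0 st.1.length 1).foldl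
      (fun x i =>
        if PySem.List.pyGetD st.1 i 0 = 1 then x ++ [PySem.List.pyGetD st.2.2 i []] else x)
      [], true)
  else ([], false)

-- ===== PORT B =====
def get_solution_vec_alt (ini_vec : List Int) (pre_trans_lst : List (List Int)) : List (List Int) × Bool :=
  let n : Int := ini_vec.length
  let x := pre_trans_lst.foldl
    (fun (x : List (List Int)) trans_lst =>
      let counts := trans_lst.foldl
        (fun (d : PySem.Dict Int Int) t =>
          let i := if t < 0 then t + n else t
          d.insert i (d.getD i 0 + 1))
        PySem.Dict.empty
      if counts.items.all (fun p => decide (PySem.List.pyGetD ini_vec p.1 0 ≥ p.2)) then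
        x ++ [(PySem.List.pyRange 0 n 1).map
                (fun i => PySem.List.pyGetD ini_vec i 0 - counts.getD i 0)]
      else x)
    []
  (x, !x.isEmpty)

-- ===== PRECONDITION & SPEC =====
-- Pre_ excludes exactly the inputs with an index outside [-len(ini_vec), len(ini_vec)):
-- on those A raises IndexError, except that A's early break can return ([], False)
-- before reaching such an index (B returns the same value on those cited corners,
-- but the agreement there is accidental to A's scan order, so they stay outside).
def Pre_get_solution_vec (ini_vec : List Int) (pre_trans_lst : List (List Int)) : Prop :=
  ∀ ts ∈ pre_trans_lst, ∀ t ∈ ts, -(ini_vec.length : Int) ≤ t ∧ t < (ini_vec.length : Int)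
instance (ini_vec : List Int) (pre_trans_lst : List (List Int)) : Decidable (Pre_get_solution_vec ini_vec pre_trans_lst) := by unfold Pre_get_solution_vec; infer_instance

def pvWitness_get_solution_vec : List Int × List (List Int) := ([1, 0, 2], [[0, 2], [1], [2, 2], [-1]])

def Spec_get_solution_vec (ini_vec : List Int) (pre_trans_lst : List (List Int)) (out : List (List Int) × Bool) : Prop := out = get_solution_vec_alt ini_vec pre_trans_lst
instance (ini_vec : List Int) (pre_trans_lst : List (List Int)) (out : List (List Int) × Bool) : Decidable (Spec_get_solution_vec ini_vec pre_trans_lst out) := by unfold Spec_get_solution_vec; infer_instance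

-- ===== CLAIM (what is proved, stated in full; the proofs are below) =====
def Claim_equal_get_solution_vec : Prop := ∀ (ini_vec : List Int) (pre_trans_lst : List (List Int)), Dom_get_solution_vec ini_vec pre_trans_lst → Pre_get_solution_vec ini_vec pre_trans_lst → Spec_get_solution_vec ini_vec pre_trans_lst (get_solution_vec ini_vec pre_trans_lst)

-- ===== LEMMAS AND PROOFS =====

-- normalized (non-negative) index list of one path
def pvNorm (n : Nat) (ts : List Int) : List Int := ts.map (fun t => PySem.Int.mod t (n : Int))

lemma pv_mod_spec (n : Nat) (t : Int) (h1 : -(n : Int) ≤ t) (h2 : t < (n : Int)) :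
    (0 ≤ PySem.Int.mod t (n : Int) ∧ PySem.Int.mod t (n : Int) < (n : Int)) ∧
    PySem.Int.mod t (n : Int) = (if t < 0 then t + n else t) := by
  have hn : (0:Int) < n := by omega
  rw [PySem.Int.mod_eq_emod_of_pos (b := (n:Int)) hn]
  split_ifs with h
  · have : t % (n:Int) = (t + n) % n := by
      conv_lhs => rw [← Int.add_mul_emod_self_left (a := t) (b := (n:Int)) (c := 1)]
      ring_nf
    rw [this, Int.emod_eq_of_lt (by omega) (by omega)]
    exact ⟨⟨by omega, by omega⟩, rfl⟩
  · rw [Int.emod_eq_of_lt (by omega) (by omega)]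
    exact ⟨⟨by omega, by omega⟩, rfl⟩

lemma pv_pyGetD_norm (v : List Int) (t : Int) (d : Int)
    (h1 : -(v.length : Int) ≤ t) (h2 : t < (v.length : Int)) :
    PySem.List.pyGetD v t d = v.getD (PySem.Int.mod t (v.length : Int)).toNat d := by
  have hn : (0:Int) < v.length := by omega
  have hm : PySem.Int.mod t (v.length:Int) = (if t < 0 then t + v.length else t) := by
    rw [PySem.Int.mod_eq_emod_of_pos (b := (v.length:Int)) hn]
    split_ifs with h
    · conv_lhs => rw [← Int.add_mul_emod_self_left (a := t) (b := ((v.length:Nat):Int)) (c := 1)]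
      rw [show t + (v.length:Int) * 1 = t + v.length by ring, Int.emod_eq_of_lt (by omega) (by omega)]
    · rw [Int.emod_eq_of_lt (by omega) (by omega)]
  rw [hm]
  by_cases h : t < 0
  · simp only [if_pos h]
    rw [show t = -(((-t).toNat : Nat) : Int) by omega,
      PySem.List.pyGetD_neg_natCast v (-t).toNat d (by omega) (by omega)]
    rw [show (-(((-t).toNat:Nat):Int) + v.length).toNat = v.length - (-t).toNat by omega,
      List.getD_eq_getElem _ _ (by omega)]
  · simp only [if_neg h]
    rw [PySem.List.pyGetD_eq_getElem v d (by omega) (by omega), List.getD_eq_getElem _ _ (by omega)]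

lemma pv_pySetD_norm (v : List Int) (t x : Int)
    (h1 : -(v.length : Int) ≤ t) (h2 : t < (v.length : Int)) :
    PySem.List.pySetD v t x = v.set (PySem.Int.mod t (v.length : Int)).toNat x := by
  have hn : (0:Int) < v.length := by omega
  have hm : PySem.Int.mod t (v.length:Int) = (if t < 0 then t + v.length else t) := by
    rw [PySem.Int.mod_eq_emod_of_pos (b := (v.length:Int)) hn]
    split_ifs with h
    · conv_lhs => rw [← Int.add_mul_emod_self_left (a := t) (b := ((v.length:Nat):Int)) (c := 1)]
      rw [show t + (v.length:Int) * 1 = t + v.length by ring, Int.emod_eq_of_lt (by omega) (by omega)]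
    · rw [Int.emod_eq_of_lt (by omega) (by omega)]
  rw [hm]
  by_cases h : t < 0
  · simp only [if_pos h]
    simp only [PySem.List.pySetD, PySem.List.pySet?, PySem.List.pyIdx?,
      if_neg (show ¬ (0:Int) ≤ t by omega), if_pos h1, Option.map_some, Option.getD_some]
    rw [show v.length - (-t).toNat = (t + (v.length:Int)).toNat by omega]
  · simp only [if_neg h]
    rw [PySem.List.pySetD_of_nonneg v x (by omega)]

lemma pvNorm_bounds (n : Nat) (ts : List Int) (hb : ∀ t ∈ ts, -(n : Int) ≤ t ∧ t < (n : Int)) :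
    ∀ j ∈ pvNorm n ts, 0 ≤ j ∧ j < (n : Int) := by
  intro j hj
  simp only [pvNorm, List.mem_map] at hj
  obtain ⟨t, ht, rfl⟩ := hj
  exact (pv_mod_spec n t (hb t ht).1 (hb t ht).2).1

lemma pvInnerA_spec (n : Nat) : ∀ (ts v : List Int), v.length = n →
    (∀ t ∈ ts, -(n : Int) ≤ t ∧ t < (n : Int)) →
    (pvInnerA v ts).1.length = n ∧
    ((pvInnerA v ts).2 = true ↔
      ∀ j ∈ pvNorm n ts, ((pvNorm n ts).count j : Int) ≤ v.getD j.toNat 0) ∧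
    ((pvInnerA v ts).2 = true →
      ∀ j : Nat, (pvInnerA v ts).1.getD j 0 = v.getD j 0 - ((pvNorm n ts).count (j : Int) : Int)) := by
  intro ts
  induction ts with
  | nil =>
    intro v hlen _
    refine ⟨hlen, by simp [pvInnerA, pvNorm], ?_⟩
    intro _ j; simp [pvInnerA, pvNorm]
  | cons t ts' ih =>
    intro v hlen hb
    have hbt := hb t (by simp)
    have hbt' : ∀ t' ∈ ts', -(n : Int) ≤ t' ∧ t' < (n : Int) := fun t' ht' => hb t' (by simp [ht'])
    have hmb : 0 ≤ PySem.Int.mod t (n : Int) ∧ PySem.Int.mod t (n : Int) < (n : Int) :=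
      (pv_mod_spec n t hbt.1 hbt.2).1
    set m : Int := PySem.Int.mod t (n : Int) with hmdef
    have hml : m.toNat < v.length := by omega
    have hconsn : pvNorm n (t :: ts') = m :: pvNorm n ts' := by
      simp [pvNorm, hmdef]
    have hset : PySem.List.pySetD v t (PySem.List.pyGetD v t 0 - 1)
        = v.set m.toNat (v.getD m.toNat 0 - 1) := by
      rw [pv_pyGetD_norm v t 0 (by omega) (by omega), pv_pySetD_norm v t _ (by omega) (by omega), hlen]
    have hlen' : (v.set m.toNat (v.getD m.toNat 0 - 1)).length = n := by
      rw [List.length_set]; exact hlen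
    have hget' : PySem.List.pyGetD (v.set m.toNat (v.getD m.toNat 0 - 1)) t 0
        = v.getD m.toNat 0 - 1 := by
      rw [pv_pyGetD_norm _ t 0 (by rw [hlen']; omega) (by rw [hlen']; omega), hlen', ← hmdef]
      rw [List.getD_eq_getElem _ _ (by rw [List.length_set]; exact hml),
        List.getElem_set_self (by rw [List.length_set]; exact hml)]
    have hstep : pvInnerA v (t :: ts') =
        (if v.getD m.toNat 0 - 1 < 0 then (v.set m.toNat (v.getD m.toNat 0 - 1), false)
         else pvInnerA (v.set m.toNat (v.getD m.toNat 0 - 1)) ts') := by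
      simp only [pvInnerA, hset, hget']
    have hgd : ∀ j : Nat, (v.set m.toNat (v.getD m.toNat 0 - 1)).getD j 0
        = v.getD j 0 - (if (j : Int) = m then 1 else 0) := by
      intro j
      by_cases hj : (j : Int) = m
      · have hjm : j = m.toNat := by omega
        rw [if_pos hj, hjm, List.getD_eq_getElem _ _ (by rw [List.length_set]; exact hml),
          List.getElem_set_self (by rw [List.length_set]; exact hml), List.getD_eq_getElem _ _ hml]
      · rw [if_neg hj]
        by_cases hlt : j < n
        · rw [List.getD_eq_getElem _ 0 (show j < (v.set m.toNat (v.getD m.toNat 0 - 1)).length by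
              rw [List.length_set, hlen]; omega),
            List.getElem_set_of_ne (by omega),
            List.getD_eq_getElem v 0 (show j < v.length by rw [hlen]; omega)]
          omega
        · rw [List.getD_eq_default _ _ (by rw [List.length_set, hlen]; omega),
            List.getD_eq_default _ _ (by rw [hlen]; omega)]
          omega
    have hcnt : ∀ j : Int, ((pvNorm n (t :: ts')).count j : Int)
        = ((pvNorm n ts').count j : Int) + (if j = m then 1 else 0) := by
      intro j
      rw [hconsn, List.count_cons]
      simp only [beq_iff_eq]
      split_ifs <;> push_cast <;> omega
    by_cases hbreak : v.getD m.toNat 0 - 1 < 0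
    · rw [hstep, if_pos hbreak]
      refine ⟨hlen', iff_of_false (by simp) ?_, by simp⟩
      intro hall
      have h1 := hall m (by rw [hconsn]; exact List.mem_cons_self ..)
      rw [hcnt m, if_pos rfl] at h1
      have h2 : (0:Int) ≤ ((pvNorm n ts').count m : Int) := by positivity
      omega
    · rw [hstep, if_neg hbreak]
      obtain ⟨ihlen, ihiff, ihvec⟩ := ih _ hlen' hbt'
      refine ⟨ihlen, ?_, ?_⟩
      · rw [ihiff]
        constructor
        · intro L j hj
          rw [hconsn] at hj
          rcases List.mem_cons.mp hj with hj0 | hj'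
          · rw [hj0, hcnt m, if_pos rfl]
            have hjj : ((m.toNat : Nat) : Int) = m := by omega
            by_cases hmem : m ∈ pvNorm n ts'
            · have h1 := L m hmem
              rw [hgd m.toNat, hjj, if_pos rfl] at h1
              omega
            · rw [List.count_eq_zero_of_not_mem hmem]
              push_cast
              omega
          · have hjb := pvNorm_bounds n ts' hbt' j hj'
            have h1 := L j hj'
            have hjj : ((j.toNat : Nat) : Int) = j := by omega
            rw [hgd j.toNat, hjj] at h1
            rw [hcnt j]
            by_cases hjm : j = m
            · rw [if_pos hjm]; rw [if_pos hjm] at h1; omega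
            · rw [if_neg hjm]; rw [if_neg hjm] at h1; omega
        · intro R j hj
          have hjb := pvNorm_bounds n ts' hbt' j hj
          have h1 := R j (by rw [hconsn]; exact List.mem_cons_of_mem _ hj)
          rw [hcnt j] at h1
          have hjj : ((j.toNat : Nat) : Int) = j := by omega
          rw [hgd j.toNat, hjj]
          by_cases hjm : j = m
          · rw [if_pos hjm] at h1 ⊢; omega
          · rw [if_neg hjm] at h1 ⊢; omega
      · intro hv j
        rw [ihvec hv j, hgd j, hcnt (j : Int)]
        by_cases hjm : (j : Int) = m
        · rw [if_pos hjm]; omega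
        · rw [if_neg hjm]; omega

lemma pv_path_flag (ini ts : List Int)
    (hb : ∀ t ∈ ts, -(ini.length : Int) ≤ t ∧ t < (ini.length : Int)) :
    ((PySem.Dict.counter (pvNorm ini.length ts)).items.all
        (fun p => decide (PySem.List.pyGetD ini p.1 0 ≥ p.2))) = (pvInnerA ini ts).2 := by
  have hA := (pvInnerA_spec ini.length ts ini rfl hb).2.1
  rw [Bool.eq_iff_iff, hA, PySem.Dict.items_counter, List.all_map, List.all_eq_true]
  constructor
  · intro H j hj
    have hjb := pvNorm_bounds ini.length ts hb j hj
    have := H j (by rw [PySem.Set.mem_ofList _ _]; exact hj)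
    simp only [Function.comp_apply, ge_iff_le, decide_eq_true_eq] at this
    rwa [PySem.List.pyGetD_eq_getElem ini 0 hjb.1 (by exact_mod_cast hjb.2),
      ← List.getD_eq_getElem ini 0 (show j.toNat < ini.length by omega)] at this
  · intro H k hk
    rw [PySem.Set.mem_ofList _ _] at hk
    have hjb := pvNorm_bounds ini.length ts hb k hk
    have := H k hk
    simp only [Function.comp_apply, ge_iff_le, decide_eq_true_eq]
    rwa [PySem.List.pyGetD_eq_getElem ini 0 hjb.1 (by exact_mod_cast hjb.2),
      ← List.getD_eq_getElem ini 0 (show k.toNat < ini.length by omega)]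

lemma pv_path_vec (ini ts : List Int)
    (hb : ∀ t ∈ ts, -(ini.length : Int) ≤ t ∧ t < (ini.length : Int))
    (hv : (pvInnerA ini ts).2 = true) :
    (PySem.List.pyRange 0 (ini.length : Int) 1).map
      (fun i => PySem.List.pyGetD ini i 0 - (PySem.Dict.counter (pvNorm ini.length ts)).getD i 0)
      = (pvInnerA ini ts).1 := by
  obtain ⟨hlen, _, hvec⟩ := pvInnerA_spec ini.length ts ini rfl hb
  apply List.ext_getElem
  · rw [List.length_map, PySem.List.length_pyRange_one, hlen]; omega
  · intro j h1 h2
    rw [List.getElem_map, PySem.List.getElem_pyRange_one, zero_add]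
    have hjlt : j < ini.length := by rwa [hlen] at h2
    rw [PySem.Dict.getD_counter, ← List.getD_eq_getElem _ 0 h2, hvec hv j,
      PySem.List.pyGetD_natCast]

lemma pv_outerA (ini : List Int) : ∀ (rest : List (List Int)) (df : List Int) (ds : List (List Int)),
    rest.foldl
      (fun (st : List Int × Int × List (List Int)) trans_lst =>
        let r := pvInnerA ini trans_lst
        let vp := if r.2 then st.1 else PySem.List.pySetD st.1 st.2.1 0
        (vp, st.2.1 + 1, st.2.2 ++ [r.1]))
      (df ++ List.replicate rest.length 1, (df.length : Int), ds)
    = (df ++ rest.map (fun ts => if (pvInnerA ini ts).2 then (1 : Int) else 0),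
       (df.length : Int) + rest.length,
       ds ++ rest.map (fun ts => (pvInnerA ini ts).1)) := by
  intro rest
  induction rest with
  | nil => intro df ds; simp
  | cons ts rest ih =>
    intro df ds
    simp only [List.foldl_cons, List.length_cons, List.replicate_succ]
    have hset : PySem.List.pySetD (df ++ 1 :: List.replicate rest.length 1) (df.length : Int) 0
        = df ++ 0 :: List.replicate rest.length 1 := by
      rw [PySem.List.pySetD_of_nonneg _ _ (by positivity), Int.toNat_natCast,
        List.set_append_right _ _ (le_refl _)]
      simp
    have key : ∀ fl : Int,
        (df ++ fl :: List.replicate rest.length 1) = ((df ++ [fl]) ++ List.replicate rest.length 1) := by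
      intro fl; simp
    by_cases hfl : (pvInnerA ini ts).2
    · simp only [hfl, if_true]
      rw [key 1, show ((df.length : Int) + 1) = (((df ++ [(1:Int)]).length : Int)) by simp,
        show ds ++ [(pvInnerA ini ts).1] = ds ++ [(pvInnerA ini ts).1] from rfl]
      rw [ih (df ++ [1]) (ds ++ [(pvInnerA ini ts).1])]
      simp [hfl]
      omega
    · simp only [hfl, if_false, Bool.false_eq_true, hset]
      rw [key 0, show ((df.length : Int) + 1) = (((df ++ [(0:Int)]).length : Int)) by simp]
      rw [ih (df ++ [0]) (ds ++ [(pvInnerA ini ts).1])]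
      simp [hfl]
      omega

lemma pv_extract (ini : List Int) (P : List (List Int)) :
    ∀ (fuel j : Nat) (acc : List (List Int)), P.length - j = fuel → j ≤ P.length →
    (PySem.List.pyRange (j : Int) ((P.map (fun ts => if (pvInnerA ini ts).2 then (1 : Int) else 0)).length : Int) 1).foldl
      (fun x i =>
        if PySem.List.pyGetD (P.map (fun ts => if (pvInnerA ini ts).2 then (1 : Int) else 0)) i 0 = 1
        then x ++ [PySem.List.pyGetD (P.map (fun ts => (pvInnerA ini ts).1)) i []] else x)
      acc
    = acc ++ ((P.drop j).filter (fun ts => (pvInnerA ini ts).2)).map (fun ts => (pvInnerA ini ts).1) := by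
  intro fuel
  induction fuel with
  | zero =>
    intro j acc hf hj
    have hjeq : j = P.length := by omega
    rw [List.length_map, PySem.List.pyRange_one_eq_nil (by omega : ((P.length : Nat) : Int) ≤ (j : Int))]
    subst hjeq
    simp
  | succ k ih =>
    intro j acc hf hj
    have hjlt : j < P.length := by omega
    rw [List.length_map, PySem.List.pyRange_one_cons (by exact_mod_cast hjlt)]
    simp only [List.foldl_cons]
    have hflag : PySem.List.pyGetD (P.map (fun ts => if (pvInnerA ini ts).2 then (1 : Int) else 0)) (j : Int) 0
        = (if (pvInnerA ini P[j]).2 then (1 : Int) else 0) := by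
      rw [PySem.List.pyGetD_natCast, List.getD_eq_getElem _ _ (by simpa using hjlt), List.getElem_map]
    have hvec : PySem.List.pyGetD (P.map (fun ts => (pvInnerA ini ts).1)) (j : Int) []
        = (pvInnerA ini P[j]).1 := by
      rw [PySem.List.pyGetD_natCast, List.getD_eq_getElem _ _ (by simpa using hjlt), List.getElem_map]
    have hdrop : P.drop j = P[j] :: P.drop (j + 1) := List.drop_eq_getElem_cons hjlt
    have hstep : ((j : Int) + 1) = ((j + 1 : Nat) : Int) := by push_cast; ring
    rw [hflag, hvec, hdrop, hstep]
    have ih' := ih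
    simp only [List.length_map] at ih'
    by_cases hb : (pvInnerA ini P[j]).2
    · have hc : (if (pvInnerA ini P[j]).2 then (1 : Int) else 0) = 1 := by rw [if_pos hb]
      rw [hc, if_pos rfl, ih' (j + 1) (acc ++ [(pvInnerA ini P[j]).1]) (by omega) (by omega),
        List.filter_cons, if_pos (by simpa using hb), List.map_cons, List.append_assoc,
        List.singleton_append]
    · have hc : ¬ ((if (pvInnerA ini P[j]).2 then (1 : Int) else 0) = 1) := by rw [if_neg hb]; simp
      rw [if_neg hc, ih' (j + 1) acc (by omega) (by omega), List.filter_cons,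
        if_neg (by simpa using hb)]

lemma pv_outerB (ini : List Int) : ∀ (P : List (List Int)) (acc : List (List Int)),
    (∀ ts ∈ P, ∀ t ∈ ts, -(ini.length : Int) ≤ t ∧ t < (ini.length : Int)) →
    P.foldl
      (fun (x : List (List Int)) trans_lst =>
        let counts := trans_lst.foldl
          (fun (d : PySem.Dict Int Int) t =>
            let i := if t < 0 then t + (ini.length : Int) else t
            d.insert i (d.getD i 0 + 1))
          PySem.Dict.empty
        if counts.items.all (fun p => decide (PySem.List.pyGetD ini p.1 0 ≥ p.2)) then
          x ++ [(PySem.List.pyRange 0 (ini.length : Int) 1).map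
                  (fun i => PySem.List.pyGetD ini i 0 - counts.getD i 0)]
        else x)
      acc
    = acc ++ (P.filter (fun ts => (pvInnerA ini ts).2)).map (fun ts => (pvInnerA ini ts).1) := by
  intro P
  induction P with
  | nil => intro acc _; simp
  | cons ts P ih =>
    intro acc hb
    have hbts := hb ts (by simp)
    have hbP : ∀ ts' ∈ P, ∀ t ∈ ts', -(ini.length : Int) ≤ t ∧ t < (ini.length : Int) :=
      fun ts' h => hb ts' (by simp [h])
    simp only [List.foldl_cons]
    have hcounts : ts.foldl
        (fun (d : PySem.Dict Int Int) t =>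
          let i := if t < 0 then t + (ini.length : Int) else t
          d.insert i (d.getD i 0 + 1))
        PySem.Dict.empty
        = PySem.Dict.counter (pvNorm ini.length ts) := by
      have hmap : ts.map (fun t => if t < 0 then t + (ini.length : Int) else t)
          = pvNorm ini.length ts := by
        apply List.map_congr_left
        intro t ht
        exact ((pv_mod_spec ini.length t (hbts t ht).1 (hbts t ht).2).2).symm
      rw [← PySem.Dict.foldl_insert_getD_add_one_eq_counter, ← hmap, List.foldl_map]
    rw [hcounts, pv_path_flag ini ts hbts]
    by_cases hf : (pvInnerA ini ts).2
    · rw [if_pos hf, ih _ hbP, pv_path_vec ini ts hbts hf, List.filter_cons, if_pos (by simpa using hf)]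
      simp
    · rw [if_neg (by simpa using hf), ih _ hbP, List.filter_cons, if_neg (by simpa using hf)]

theorem pv_main (ini_vec : List Int) (pre_trans_lst : List (List Int))
    (hpre : Pre_get_solution_vec ini_vec pre_trans_lst) :
    get_solution_vec ini_vec pre_trans_lst = get_solution_vec_alt ini_vec pre_trans_lst := by
  have hb := hpre
  unfold Pre_get_solution_vec at hb
  simp only [get_solution_vec, get_solution_vec_alt]
  have hinit : (PySem.List.pyRange 0 (pre_trans_lst.length : Int) 1).map (fun _ => (1:Int))
      = List.replicate pre_trans_lst.length 1 := by
    rw [List.eq_replicate_iff]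
    refine ⟨by simp [PySem.List.length_pyRange_one], by simp⟩
  have houtA := pv_outerA ini_vec pre_trans_lst [] []
  simp only [List.nil_append, List.length_nil, Nat.cast_zero, zero_add] at houtA
  have houtB := pv_outerB ini_vec pre_trans_lst [] hb
  simp only [List.nil_append] at houtB
  rw [hinit, houtA, houtB]
  set flagf := fun ts => if (pvInnerA ini_vec ts).2 then (1:Int) else 0 with hflagf
  by_cases hmem : (1:Int) ∈ pre_trans_lst.map flagf
  · rw [if_pos hmem]
    dsimp only
    have hex := pv_extract ini_vec pre_trans_lst pre_trans_lst.length 0 [] (by omega) (by omega)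
    rw [Nat.cast_zero, List.drop_zero, List.nil_append] at hex
    rw [← hflagf] at hex
    rw [hex]
    have hne : (pre_trans_lst.filter (fun ts => (pvInnerA ini_vec ts).2)) ≠ [] := by
      obtain ⟨ts, hts, hf1⟩ := List.mem_map.mp hmem
      have hf : (pvInnerA ini_vec ts).2 = true := by
        by_contra hc
        rw [hflagf] at hf1
        simp only [Bool.not_eq_true] at hc
        simp [hc] at hf1
      intro hnil
      have : ts ∈ pre_trans_lst.filter (fun ts => (pvInnerA ini_vec ts).2) :=
        List.mem_filter.mpr ⟨hts, by simp [hf]⟩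
      rw [hnil] at this
      exact List.not_mem_nil this
    have : (List.map (fun ts => (pvInnerA ini_vec ts).1)
        (List.filter (fun ts => (pvInnerA ini_vec ts).2) pre_trans_lst)).isEmpty = false := by
      rw [List.isEmpty_eq_false_iff]
      simpa using hne
    rw [this]
    rfl
  · rw [if_neg hmem]
    have hnil : (pre_trans_lst.filter (fun ts => (pvInnerA ini_vec ts).2)) = [] := by
      rw [List.filter_eq_nil_iff]
      intro ts hts
      intro hf
      apply hmem
      apply List.mem_map.mpr
      exact ⟨ts, hts, by rw [hflagf]; simp [hf]⟩
    rw [hnil]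
    simp

-- ===== VERDICT (by name: the statement is the Claim_ definition above) =====
theorem get_solution_vec_spec : Claim_equal_get_solution_vec := by
  intro ini_vec pre_trans_lst _ hpre
  exact pv_main ini_vec pre_trans_lst hpre
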